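-- pv_equiv track=rewrite | github.com/redlessme/advanced-ds-and-algorithm | A3/lzss_encoder.py | elias
-- ===== SOURCE A (Python) =====
-- def elias(num):
--     arr = []
--     var = ""
--     # convert to bitstring
--     value = list(bin(num)[2:])
--     if value[0] == 1: #if the leading bit is a 1,
--         value[0] = 0 #change to 0
--     arr.append(var.join(value))
--     L = len(value)  # length
--     while L>1:
--         var = ""
--         L -=1
--         value = list(bin(L)[2:])
--         if value[0] == bin(1)[2:]:
--             value[0] = bin(0)[2:]
--         arr.append(var.join(value))
--         L = len(value) #update length
--     var = ""
--     for i in reversed(arr):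
--         var+=i
--     return var
-- ===== SOURCE B (Python) =====
-- def elias(num):
--     # Recursive Elias-omega style decomposition: head component is bin(num)[2:]
--     # unmodified; each length component gets its leading bit forced to '0'.
--     def tail(L):
--         if L <= 1:
--             return ''
--         comp = '0' + bin(L - 1)[3:]
--         return tail(len(comp)) + comp
--     s = bin(num)[2:]
--     return tail(len(s)) + s
-- ===== Notes on version B (the rewrite author's own statement) =====
-- stated objective: simpler
-- what changed: Replaces A's imperative while-loop that accumulates components in a list and then reverse-joins them with the classical recursive Elias-omega decomposition: a small recursive helper tail(L) returns the already-ordered prefix, so no list, no in-place list(bin..) mutation and no reversal pass are needed.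
import Mathlib
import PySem

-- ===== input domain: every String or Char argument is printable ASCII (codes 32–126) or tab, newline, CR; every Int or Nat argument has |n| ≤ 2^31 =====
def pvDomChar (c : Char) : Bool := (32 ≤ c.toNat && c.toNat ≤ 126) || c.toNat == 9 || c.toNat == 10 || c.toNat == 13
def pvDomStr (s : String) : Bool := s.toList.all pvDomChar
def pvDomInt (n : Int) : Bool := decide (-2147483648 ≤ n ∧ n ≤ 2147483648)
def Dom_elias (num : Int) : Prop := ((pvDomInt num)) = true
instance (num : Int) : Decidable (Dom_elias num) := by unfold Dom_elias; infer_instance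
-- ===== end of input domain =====

-- B replaces A's imperative accumulate-then-reverse-join loop by the classical
-- recursive Elias-omega decomposition (objective: simpler; same cost).

-- ----- shared helper: Python's bin -----
-- natBits n = the binary digits of n (MSB first), [] for 0; exact port of the
-- digit string bin(n)[2:] for n ≥ 1 (hand-written, exact on all Nat).
def natBits (n : Nat) : List Char :=
  if _h : n = 0 then []
  else natBits (n / 2) ++ [if n % 2 = 1 then '1' else '0']
decreasing_by exact Nat.div_lt_self (Nat.pos_of_ne_zero _h) (by norm_num)

-- binTail num = bin(num)[2:] exactly: for num < 0, bin gives '-0b…' so the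
-- slice keeps a leading 'b'; bin(0)[2:] = '0'.
def binTail (num : Int) : List Char :=
  if num < 0 then 'b' :: natBits num.natAbs
  else if num = 0 then ['0']
  else natBits num.toNat

theorem natBits_length_le (n : Nat) : (natBits n).length ≤ n := by
  induction n using Nat.strong_induction_on with
  | _ n ih =>
    rw [natBits]
    split
    · simp
    · rename_i h
      have h2 : n / 2 < n := Nat.div_lt_self (Nat.pos_of_ne_zero h) (by norm_num)
      have := ih (n / 2) h2
      simp only [List.length_append, List.length_cons, List.length_nil]
      omega

theorem binTail_natCast (n : Nat) (h : 0 < n) : binTail (n : Int) = natBits n := by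
  unfold binTail
  rw [if_neg (by omega), if_neg (by omega)]
  simp

-- A's in-place 'if value[0] == bin(1)[2:]: value[0] = bin(0)[2:]' branch
def eliasMod (v : List Char) : List Char :=
  if v.head? = some '1' then '0' :: v.tail else v

theorem eliasMod_length_le (v : List Char) : (eliasMod v).length ≤ v.length := by
  cases v <;> simp [eliasMod] <;> (split <;> simp)

theorem eliasLoop_dec (L : Nat) (h : 1 < L) :
    (eliasMod (binTail ((L - 1 : Nat) : Int))).length < L := by
  rw [binTail_natCast _ (by omega : 0 < L - 1)]
  have h1 := eliasMod_length_le (natBits (L - 1))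
  have h2 := natBits_length_le (L - 1)
  omega

theorem tailF_dec (L : Nat) (h : ¬ L ≤ 1) :
    ('0' :: (binTail ((L - 1 : Nat) : Int)).tail).length < L := by
  rw [binTail_natCast _ (by omega)]
  have h2 := natBits_length_le (L - 1)
  have h3 : natBits (L - 1) ≠ [] := by
    rw [natBits]; rw [dif_neg (by omega)]; simp
  simp only [List.length_cons]
  cases hv : natBits (L - 1) with
  | nil => exact absurd hv h3
  | cons a t => rw [hv] at h2; simp at h2 ⊢; omega

-- ===== PORT A =====
-- A's first branch 'if value[0] == 1' compares a 1-char string with the int 1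
-- and is therefore always False in Python: a no-op, ported as nothing.
def eliasLoop (L : Nat) (arr : List (List Char)) : List (List Char) :=
  if _h : 1 < L then
    eliasLoop (eliasMod (binTail ((L - 1 : Nat) : Int))).length
      (arr ++ [eliasMod (binTail ((L - 1 : Nat) : Int))])
  else arr
termination_by L
decreasing_by exact eliasLoop_dec L _h

def elias (num : Int) : String :=
  String.mk (((eliasLoop (binTail num).length [binTail num]).reverse).foldl (· ++ ·) [])

-- ===== PORT B =====
-- tailF = B's recursive tail(L); '0' + bin(L-1)[3:] = '0' :: (bin(L-1)[2:]).tail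
def tailF (L : Nat) : List Char :=
  if _h : L ≤ 1 then []
  else tailF ('0' :: (binTail ((L - 1 : Nat) : Int)).tail).length
        ++ ('0' :: (binTail ((L - 1 : Nat) : Int)).tail)
decreasing_by exact tailF_dec L _h

def elias_alt (num : Int) : String :=
  String.mk (tailF (binTail num).length ++ binTail num)

-- ===== PRECONDITION & SPEC =====
def Spec_elias (num : Int) (out : String) : Prop := out = elias_alt num
instance (num : Int) (out : String) : Decidable (Spec_elias num out) := by unfold Spec_elias; infer_instance

-- ===== CLAIM (what is proved, stated in full; the proofs are below) =====
def Claim_equal_elias : Prop := ∀ (num : Int), Dom_elias num → Spec_elias num (elias num)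

-- ===== LEMMAS AND PROOFS =====
theorem natBits_head (n : Nat) (h : n ≠ 0) : (natBits n).head? = some '1' := by
  induction n using Nat.strong_induction_on with
  | _ n ih =>
    rw [natBits, dif_neg h]
    by_cases h2 : n / 2 = 0
    · have hn1 : n = 1 := by omega
      subst hn1; simp [natBits]
    · have := ih (n / 2) (Nat.div_lt_self (Nat.pos_of_ne_zero h) (by norm_num)) h2
      cases hv : natBits (n / 2) with
      | nil => rw [hv] at this; simp at this
      | cons a t => rw [hv] at this; simp at this; simp [this]

theorem eliasLoop_join (L : Nat) (arr : List (List Char)) :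
    ((eliasLoop L arr).reverse).foldl (· ++ ·) [] =
      tailF L ++ ((arr.reverse).foldl (· ++ ·) []) := by
  induction L using Nat.strong_induction_on generalizing arr with
  | _ L ih =>
    rw [eliasLoop.eq_def]
    by_cases h : 1 < L
    · rw [dif_pos h]
      have hb : binTail ((L - 1 : Nat) : Int) = natBits (L - 1) :=
        binTail_natCast _ (by omega)
      have hh : (natBits (L - 1)).head? = some '1' := natBits_head _ (by omega)
      have hm : eliasMod (binTail ((L - 1 : Nat) : Int)) =
          '0' :: (binTail ((L - 1 : Nat) : Int)).tail := by
        rw [eliasMod, if_pos (by rw [hb]; exact hh)]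
      rw [hm, ih _ (tailF_dec L (by omega))]
      conv_rhs => rw [tailF.eq_def, dif_neg (by omega : ¬ L ≤ 1)]
      simp [List.append_assoc]
    · rw [dif_neg h, tailF.eq_def, dif_pos (by omega : L ≤ 1)]
      simp

-- ===== VERDICT (by name: the statement is the Claim_ definition above) =====
theorem elias_spec : Claim_equal_elias := by
  intro num _
  unfold Spec_elias elias elias_alt
  rw [eliasLoop_join]
  simp
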